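-- pv_equiv track=rewrite | github.com/christiaanjs/treeflow | tensorflow_likelihood.py | compress_sites
-- ===== SOURCE A (Python) =====
-- from collections import Counter
--
-- def compress_sites(sequence_dict):
--     taxa = sorted(list(sequence_dict.keys()))
--     sequences = [sequence_dict[taxon] for taxon in taxa]
--     patterns = list(zip(*sequences))
--     count_dict = Counter(patterns)
--     pattern_ordering = sorted(list(count_dict.keys()))
--     compressed_sequences = list(zip(*pattern_ordering))
--     counts = [count_dict[pattern] for pattern in pattern_ordering]
--     pattern_dict = dict(zip(taxa, compressed_sequences))
--     return pattern_dict, counts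
-- ===== SOURCE B (Python) =====
-- def compress_sites(sequence_dict):
--     taxa = sorted(sequence_dict)
--     sequences = [sequence_dict[taxon] for taxon in taxa]
--     patterns = sorted(zip(*sequences))
--     uniques = []
--     counts = []
--     for pattern in patterns:
--         if uniques and uniques[-1] == pattern:
--             counts[-1] += 1
--         else:
--             uniques.append(pattern)
--             counts.append(1)
--     pattern_dict = dict(zip(taxa, zip(*uniques)))
--     return pattern_dict, counts
-- ===== Notes on version B (the rewrite author's own statement) =====
-- stated objective: alternative
-- what changed: A counts patterns with a Counter and then sorts the distinct keys; B sorts the full pattern list once and produces the unique patterns and their counts in a single run-length-encoding pass over the sorted list.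
import Mathlib
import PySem

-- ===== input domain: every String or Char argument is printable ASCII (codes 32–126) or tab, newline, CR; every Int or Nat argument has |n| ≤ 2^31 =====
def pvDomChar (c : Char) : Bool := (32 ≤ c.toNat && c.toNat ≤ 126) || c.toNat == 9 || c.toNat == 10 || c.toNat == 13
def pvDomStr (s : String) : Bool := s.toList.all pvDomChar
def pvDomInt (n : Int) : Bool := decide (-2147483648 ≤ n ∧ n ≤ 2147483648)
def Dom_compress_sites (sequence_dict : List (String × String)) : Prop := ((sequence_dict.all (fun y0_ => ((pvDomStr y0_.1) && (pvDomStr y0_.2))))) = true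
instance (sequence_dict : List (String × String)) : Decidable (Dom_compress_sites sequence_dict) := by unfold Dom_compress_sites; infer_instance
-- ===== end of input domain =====

-- B replaces A's Counter-then-sorted-keys decomposition by sort-all-patterns then a one-pass run-length encoding (alternative decomposition, same result).


-- ===== PORT A =====
-- shared helpers (both Pythons build the site-pattern tuples with zip(*sequences)):
-- length of the shortest row (Python zip stops at the shortest iterable)
def pyMinLen (rows : List (List String)) : Nat :=
  match rows with
  | [] => 0
  | r :: rs => rs.foldl (fun m s => min m s.length) r.length

-- Python's zip(*rows): transpose truncated to the shortest row; zip of no iterables is empty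
def pyZipStar (rows : List (List String)) : List (List String) :=
  match rows with
  | [] => []
  | _ => (List.range (pyMinLen rows)).map (fun i => rows.map (fun r => r.getD i ""))

-- iterating a Python str yields its characters as 1-character strings
def strChars (s : String) : List String := s.toList.map (fun c => String.ofList [c])

def compress_sites (sequence_dict : List (String × String)) : (List (String × List String)) × List Int :=
  let d := PySem.Dict.mk sequence_dict
  let taxa := PySem.List.sorted (PySem.List.dedup (sequence_dict.map Prod.fst)) (fun x => x) false
  let sequences := taxa.map (fun t => strChars (d.getD t ""))
  let patterns := pyZipStar sequences
  let count_dict := PySem.Dict.counter patterns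
  let pattern_ordering := PySem.List.sorted count_dict.keys (fun x => x) false
  let compressed_sequences := pyZipStar pattern_ordering
  let counts := pattern_ordering.map (fun p => count_dict.getD p 0)
  (taxa.zip compressed_sequences, counts)

-- ===== PORT B =====
-- one step of Source B's run-length loop over the sorted pattern list
def rleStep (acc : List (List String) × List Int) (p : List String) : List (List String) × List Int :=
  if acc.1.getLast? = some p then (acc.1, acc.2.dropLast ++ [acc.2.getLast?.getD 0 + 1])
  else (acc.1 ++ [p], acc.2 ++ [1])

def compress_sites_alt (sequence_dict : List (String × String)) : (List (String × List String)) × List Int :=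
  let d := PySem.Dict.mk sequence_dict
  let taxa := PySem.List.sorted (PySem.List.dedup (sequence_dict.map Prod.fst)) (fun x => x) false
  let sequences := taxa.map (fun t => strChars (d.getD t ""))
  let patterns := PySem.List.sorted (pyZipStar sequences) (fun x => x) false
  let uc := patterns.foldl rleStep ([], [])
  (taxa.zip (pyZipStar uc.1), uc.2)

-- ===== PRECONDITION & SPEC =====
def Spec_compress_sites (sequence_dict : List (String × String)) (out : (List (String × List String)) × List Int) : Prop := out = compress_sites_alt sequence_dict
instance (sequence_dict : List (String × String)) (out : (List (String × List String)) × List Int) : Decidable (Spec_compress_sites sequence_dict out) := by unfold Spec_compress_sites; infer_instance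

-- ===== CLAIM (what is proved, stated in full; the proofs are below) =====
def Claim_equal_compress_sites : Prop := ∀ (sequence_dict : List (String × String)), Dom_compress_sites sequence_dict → Spec_compress_sites sequence_dict (compress_sites sequence_dict)

-- ===== LEMMAS AND PROOFS =====

-- in a ≤-sorted list every member is ≤ the last element
lemma mem_le_getLast {α : Type} [Preorder α] (l : List α) (x y : α)
    (hs : l.Pairwise (· ≤ ·)) (hx : x ∈ l) (hl : l.getLast? = some y) : x ≤ y := by
  obtain ⟨l', rfl⟩ := List.getLast?_eq_some_iff.mp hl
  rcases List.mem_append.mp hx with h | h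
  · exact (List.pairwise_append.mp hs).2.2 x h y (List.mem_singleton_self y)
  · simp_all

-- PySem.List.dedup xs is a sublist of xs
lemma dedup_sublist {α : Type} [BEq α] [LawfulBEq α] (l : List α) :
    (PySem.List.dedup l).Sublist l := by
  induction l using List.reverseRecOn with
  | nil => simp [PySem.List.dedup]
  | append_singleton l x ih =>
      simp only [PySem.List.dedup_eq_ofList, PySem.Set.ofList_append_singleton] at *
      by_cases hx : x ∈ PySem.Set.ofList l
      · rw [PySem.Set.add_of_mem hx]
        exact ih.trans (List.sublist_append_left l [x])
      · rw [PySem.Set.add_of_not_mem hx]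
        exact ih.append (List.Sublist.refl [x])

-- Source B's run-length loop over a ≤-sorted list yields (first-occurrence dedup, multiplicities)
lemma rle_sorted (l : List (List String)) (h : l.Pairwise (· ≤ ·)) :
    l.foldl rleStep ([], []) =
      (PySem.List.dedup l, (PySem.List.dedup l).map (fun x => (l.count x : Int))) := by
  induction l using List.reverseRecOn with
  | nil => simp [PySem.List.dedup]
  | append_singleton qs p ih =>
    have hqs : qs.Pairwise (· ≤ ·) := h.sublist (List.sublist_append_left qs [p])
    have hqp : ∀ x ∈ qs, x ≤ p := fun x hx =>
      (List.pairwise_append.mp h).2.2 x hx p (List.mem_singleton_self p)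
    rw [List.foldl_append, ih hqs, List.foldl_cons, List.foldl_nil]
    by_cases hp : p ∈ qs
    · have hpd : p ∈ PySem.List.dedup qs := (PySem.List.mem_dedup qs p).mpr hp
      have hds : (PySem.List.dedup qs).Pairwise (· ≤ ·) := hqs.sublist (dedup_sublist qs)
      obtain ⟨y, hy⟩ : ∃ y, (PySem.List.dedup qs).getLast? = some y := by
        cases hd : (PySem.List.dedup qs).getLast? with
        | none => exact absurd (List.getLast?_eq_none_iff.mp hd) (List.ne_nil_of_mem hpd)
        | some y => exact ⟨y, rfl⟩
      have hyp : y = p :=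
        le_antisymm (hqp y ((dedup_sublist qs).mem (List.mem_of_getLast? hy)))
          (mem_le_getLast _ _ _ hds hpd hy)
      rw [hyp] at hy
      obtain ⟨d', hd'⟩ := List.getLast?_eq_some_iff.mp hy
      have hpd' : p ∉ d' := by
        have hnd := PySem.List.nodup_dedup (xs := qs)
        rw [hd'] at hnd
        exact fun hmem => (List.nodup_append.mp hnd).2.2 p hmem p (List.mem_singleton_self p) rfl
      have hdecl : PySem.List.dedup (qs ++ [p]) = PySem.List.dedup qs := by
        simp only [PySem.List.dedup_eq_ofList, PySem.Set.ofList_append_singleton]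
        exact PySem.Set.add_of_mem ((PySem.Set.mem_ofList qs p).mpr hp)
      rw [rleStep, if_pos hy, hdecl, hd']
      refine Prod.ext rfl ?_
      simp only [List.map_append, List.map_cons, List.map_nil,
        List.dropLast_concat, List.getLast?_append, List.getLast?_singleton]
      congr 1
      · exact List.map_congr_left (fun x hx => by
          have hxp : x ≠ p := fun hh => hpd' (hh ▸ hx)
          simp only [List.count_append, List.count_cons, List.count_nil]
          simp [Ne.symm hxp])
      · simp only [List.cons.injEq, and_true]
        rw [List.count_append]
        simp
    · have hnl : ¬ (PySem.List.dedup qs).getLast? = some p := fun hl =>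
        hp ((dedup_sublist qs).mem (List.mem_of_getLast? hl))
      have hdecl : PySem.List.dedup (qs ++ [p]) = PySem.List.dedup qs ++ [p] := by
        simp only [PySem.List.dedup_eq_ofList, PySem.Set.ofList_append_singleton]
        exact PySem.Set.add_of_not_mem (fun hmem => hp ((PySem.Set.mem_ofList qs p).mp hmem))
      rw [rleStep, if_neg hnl, hdecl]
      refine Prod.ext rfl ?_
      simp only [List.map_append, List.map_cons, List.map_nil]
      congr 1
      · exact List.map_congr_left (fun x hx => by
          have hxp : x ≠ p := fun hh => hp (hh ▸ ((dedup_sublist qs).mem hx))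
          simp only [List.count_append, List.count_cons, List.count_nil]
          simp [Ne.symm hxp])
      · rw [List.count_append]
        simp [List.count_eq_zero.mpr hp]

-- PySem.List.sorted does not depend on which Decidable-< instance elaboration picked
lemma sortedInst (xs : List (List String)) :
    PySem.List.sorted xs (fun x => x) false =
      @PySem.List.sorted (List String) (List String) List.instLinearOrder.toLT
        LinearOrder.toDecidableLT xs (fun x => x) false := by
  have hinst : (fun (a b : List String) => a.decidableLT b) =
      (LinearOrder.toDecidableLT : DecidableRel (α := List String) (· < ·)) := by
    funext a b; exact Subsingleton.elim _ _
  rw [hinst]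

-- A's sorted(Counter keys) is the dedup of B's sorted pattern list
lemma pattern_ordering_eq (patterns : List (List String)) :
    PySem.List.sorted (PySem.Set.ofList patterns) (fun x => x) false =
      PySem.List.dedup (PySem.List.sorted patterns (fun x => x) false) := by
  rw [sortedInst (PySem.Set.ofList patterns), sortedInst patterns]
  refine PySem.List.sorted_eq_of_perm_of_pairwise_lt (κ := List String) _ _ _ ?_ ?_
  · rw [List.perm_ext_iff_of_nodup (PySem.List.nodup_dedup _) (PySem.Set.nodup_ofList patterns)]
    intro a
    rw [PySem.List.mem_dedup, ← sortedInst patterns, PySem.List.mem_sorted, PySem.Set.mem_ofList]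
  · exact ((List.Pairwise.sublist (dedup_sublist _)
      (PySem.List.sorted_pairwise patterns (fun x => x))).and
      (PySem.List.nodup_dedup _)).imp (fun h => lt_of_le_of_ne h.1 h.2)

-- the two result pairs agree for any taxa and raw pattern list
lemma main_eq (taxa : List String) (patterns : List (List String)) :
    (taxa.zip (pyZipStar (PySem.List.sorted (PySem.Dict.counter patterns).keys (fun x => x) false)),
      (PySem.List.sorted (PySem.Dict.counter patterns).keys (fun x => x) false).map
        (fun p => (PySem.Dict.counter patterns).getD p 0)) =
    (taxa.zip (pyZipStar ((PySem.List.sorted patterns (fun x => x) false).foldl rleStep ([], [])).1),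
      ((PySem.List.sorted patterns (fun x => x) false).foldl rleStep ([], [])).2) := by
  have hs : (PySem.List.sorted patterns (fun x => x) false).Pairwise (· ≤ ·) := by
    rw [sortedInst]; exact PySem.List.sorted_pairwise patterns _
  rw [PySem.Dict.keys_counter, pattern_ordering_eq, rle_sorted _ hs]
  refine Prod.ext rfl ?_
  refine List.map_congr_left (fun p hp => ?_)
  rw [PySem.Dict.getD_counter]
  congr 1
  exact ((PySem.List.sorted_perm patterns (fun x => x) false).count_eq p).symm

-- ===== VERDICT (by name: the statement is the Claim_ definition above) =====
theorem compress_sites_spec : Claim_equal_compress_sites := by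
  intro sequence_dict _
  show compress_sites sequence_dict = compress_sites_alt sequence_dict
  exact main_eq _ _
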